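-- pv_equiv track=rewrite | github.com/nyaruko123/GESI_python | tool/world_0_2_4_matlab/Dio.py | FixStep2
-- ===== SOURCE A (Python) =====
-- def FixStep2(f0_step1, voice_range_minimum):
--     f0_step2 = f0_step1.copy()
--     half_range = (voice_range_minimum - 1) // 2
--
--     for i in range(half_range + 1, len(f0_step1) - half_range):
--         for j in range(-half_range, half_range + 1):
--             if f0_step1[i + j] == 0:
--                 f0_step2[i] = 0
--                 break
--
--     return f0_step2
-- ===== SOURCE B (Python) =====
-- def FixStep2(f0_step1, voice_range_minimum):
--     # O(n): prefix sums of zero indicators give an O(1) "window contains a zero" test.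
--     n = len(f0_step1)
--     half_range = (voice_range_minimum - 1) // 2
--     if half_range < 0:
--         return f0_step1.copy()
--     z = 0
--     prefix = [0]
--     for v in f0_step1:
--         z += (v == 0)
--         prefix.append(z)
--     return [0 if half_range + 1 <= i < n - half_range
--                  and prefix[i + half_range + 1] > prefix[i - half_range]
--             else v
--             for i, v in enumerate(f0_step1)]
-- ===== Notes on version B (the rewrite author's own statement) =====
-- stated objective: faster
-- what changed: Replaces the O(range) inner rescan of each window by a prefix-sum array of zero indicators, so each index is decided by one O(1) comparison of two prefix counts.
import Mathlib
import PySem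

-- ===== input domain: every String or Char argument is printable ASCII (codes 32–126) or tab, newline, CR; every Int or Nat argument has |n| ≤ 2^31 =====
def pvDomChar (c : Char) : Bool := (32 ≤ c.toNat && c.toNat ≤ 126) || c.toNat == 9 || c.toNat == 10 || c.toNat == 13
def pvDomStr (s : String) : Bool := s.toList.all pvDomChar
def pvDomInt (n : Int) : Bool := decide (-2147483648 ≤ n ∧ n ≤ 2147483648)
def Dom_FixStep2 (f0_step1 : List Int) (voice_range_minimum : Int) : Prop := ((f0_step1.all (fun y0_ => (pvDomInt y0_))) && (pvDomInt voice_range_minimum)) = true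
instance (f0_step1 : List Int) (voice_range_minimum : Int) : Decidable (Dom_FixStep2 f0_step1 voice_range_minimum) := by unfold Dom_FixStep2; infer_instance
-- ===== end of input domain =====

-- B replaces A's per-index window rescan by a prefix-sum of zero indicators, one O(1) test per index.


-- ===== PORT A =====
-- inner 'for j … break' = fold over the window list carrying a 'broken' flag;
-- f0_step1[i + j] is ported as 'pyGet? … = some 0' (in A that index is always in range, so no IndexError arises)
def FixStep2 (f0_step1 : List Int) (voice_range_minimum : Int) : List Int :=
  let half_range := PySem.Int.floordiv (voice_range_minimum - 1) 2
  (PySem.List.pyRange (half_range + 1) ((f0_step1.length : Int) - half_range) 1).foldl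
    (fun f0_step2 i =>
      ((PySem.List.pyRange (-half_range) (half_range + 1) 1).foldl
        (fun (st : List Int × Bool) j =>
          if st.2 = true then st
          else if PySem.List.pyGet? f0_step1 (i + j) = some 0 then
            (PySem.List.pySetD st.1 i 0, true)
          else st)
        (f0_step2, false)).1)
    f0_step1

-- ===== PORT B =====
def FixStep2_alt (f0_step1 : List Int) (voice_range_minimum : Int) : List Int :=
  let n : Int := (f0_step1.length : Int)
  let half_range := PySem.Int.floordiv (voice_range_minimum - 1) 2
  if half_range < 0 then f0_step1
  else
    let zp := f0_step1.foldl
      (fun (s : Int × List Int) v =>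
        (s.1 + (if v = 0 then 1 else 0), s.2 ++ [s.1 + (if v = 0 then 1 else 0)]))
      (0, [0])
    (PySem.List.enumerate f0_step1 0).map
      (fun p =>
        if half_range + 1 ≤ p.1 ∧ p.1 < n - half_range ∧
           PySem.List.pyGetD zp.2 (p.1 - half_range) 0 < PySem.List.pyGetD zp.2 (p.1 + half_range + 1) 0
        then 0 else p.2)

-- ===== PRECONDITION & SPEC =====
def Spec_FixStep2 (f0_step1 : List Int) (voice_range_minimum : Int) (out : List Int) : Prop := out = FixStep2_alt f0_step1 voice_range_minimum
instance (f0_step1 : List Int) (voice_range_minimum : Int) (out : List Int) : Decidable (Spec_FixStep2 f0_step1 voice_range_minimum out) := by unfold Spec_FixStep2; infer_instance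

-- ===== CLAIM (what is proved, stated in full; the proofs are below) =====
def Claim_equal_FixStep2 : Prop := ∀ (f0_step1 : List Int) (voice_range_minimum : Int), Dom_FixStep2 f0_step1 voice_range_minimum → Spec_FixStep2 f0_step1 voice_range_minimum (FixStep2 f0_step1 voice_range_minimum)

-- ===== LEMMAS AND PROOFS =====

-- running prefix sums of the zero indicator, as produced by B's accumulating loop
def scanZ (l : List Int) (z : Int) : List Int :=
  match l with
  | [] => []
  | v :: t => (z + (if v = 0 then 1 else 0)) :: scanZ t (z + (if v = 0 then 1 else 0))

theorem scanZ_spec (l : List Int) : ∀ (z : Int) (p : List Int),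
    l.foldl (fun (s : Int × List Int) v =>
        (s.1 + (if v = 0 then 1 else 0), s.2 ++ [s.1 + (if v = 0 then 1 else 0)])) (z, p)
      = (z + ((l.count 0 : Nat) : Int), p ++ scanZ l z) := by
  induction l with
  | nil => intro z p; simp [scanZ]
  | cons v t ih =>
      intro z p
      simp only [List.foldl_cons, scanZ, ih, List.count_cons, Prod.mk.injEq]
      constructor
      · by_cases h : v = 0 <;> simp [h] <;> push_cast <;> ring
      · simp

theorem scanZ_getElem? (l : List Int) : ∀ (z : Int) (k : Nat),
    (scanZ l z)[k]? = if k < l.length then some (z + (((l.take (k+1)).count 0 : Nat) : Int)) else none := by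
  induction l with
  | nil => intro z k; simp [scanZ]
  | cons v t ih =>
      intro z k
      cases k with
      | zero =>
          simp only [scanZ, List.getElem?_cons_zero, List.length_cons, List.take_succ_cons,
            List.take_zero, List.count_cons, List.count_nil]
          by_cases h : v = 0 <;> simp [h]
      | succ k =>
          simp only [scanZ, List.getElem?_cons_succ, ih, List.take_succ_cons, List.count_cons,
            List.length_cons, Nat.add_lt_add_iff_right]
          by_cases hk : k < t.length
          · by_cases h : v = 0 <;> simp [h, hk] <;> push_cast <;> ring
          · simp [hk]

-- B's prefix list, read at position m ≤ length, is the number of zeros among the first m entries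
theorem prefix_getElem? (l : List Int) (m : Nat) (hm : m ≤ l.length) :
    ([(0 : Int)] ++ scanZ l 0)[m]? = some (((l.take m).count 0 : Nat) : Int) := by
  cases m with
  | zero => simp
  | succ m =>
      simp only [List.singleton_append, List.getElem?_cons_succ, scanZ_getElem?]
      rw [if_pos (by omega)]
      simp

-- a window of the list contains a zero iff the prefix counts strictly grow across it
theorem count_window (l : List Int) (a b : Nat) (hab : a ≤ b) :
    ((l.take a).count 0 < (l.take b).count 0) ↔ ∃ m : Nat, a ≤ m ∧ m < b ∧ l[m]? = some 0 := by
  have hb : b = a + (b - a) := by omega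
  rw [hb, List.take_add, List.count_append]
  constructor
  · intro h
    have hpos : (0 : Int) ∈ (l.drop a).take (b - a) :=
      List.count_pos_iff.mp (by omega)
    obtain ⟨k, hk⟩ := List.mem_iff_getElem?.mp hpos
    rw [List.getElem?_take] at hk
    by_cases hkb : k < b - a
    · rw [if_pos hkb, List.getElem?_drop] at hk
      exact ⟨a + k, by omega, by omega, hk⟩
    · rw [if_neg hkb] at hk; cases hk
  · rintro ⟨m, ham, hmb, hm⟩
    have h2 : ((l.drop a).take (b - a))[m - a]? = some 0 := by
      rw [List.getElem?_take, if_pos (by omega), List.getElem?_drop,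
        show a + (m - a) = m by omega]
      exact hm
    have := List.count_pos_iff.mpr (List.mem_of_getElem? h2)
    omega

-- the inner fold with the 'broken' flag: once broken, nothing changes
theorem break_fold_broken (P : Int → Prop) [DecidablePred P] (upd : List Int → List Int)
    (w : List Int) (s : List Int) :
    w.foldl (fun (st : List Int × Bool) j =>
        if st.2 = true then st else if P j then (upd st.1, true) else st) (s, true) = (s, true) := by
  induction w with
  | nil => rfl
  | cons j t ih => simpa using ih

-- the inner fold sets iff some window element satisfies P
theorem break_fold (P : Int → Prop) [DecidablePred P] (upd : List Int → List Int)
    (w : List Int) : ∀ (s : List Int),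
    (w.foldl (fun (st : List Int × Bool) j =>
        if st.2 = true then st else if P j then (upd st.1, true) else st) (s, false)).1
      = if ∃ j ∈ w, P j then upd s else s := by
  induction w with
  | nil => intro s; simp
  | cons j t ih =>
      intro s
      simp only [List.exists_mem_cons_iff]
      by_cases h : P j
      · rw [if_pos (Or.inl h), List.foldl_cons]
        simp only [Bool.false_eq_true, if_false, if_pos h]
        rw [break_fold_broken]
      · rw [List.foldl_cons]
        simp only [Bool.false_eq_true, if_false, if_neg h]
        rw [ih s]
        by_cases h2 : ∃ j' ∈ t, P j'
        · rw [if_pos h2, if_pos (Or.inr h2)]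
        · rw [if_neg h2, if_neg (by rintro (h1 | h1); exact h h1; exact h2 h1)]

-- Bool form of "the window around i contains a zero" (used so that if-conditions stay decidable)
def winB (f0 : List Int) (hr i : Int) : Bool :=
  (PySem.List.pyRange (-hr) (hr + 1) 1).any (fun j => PySem.List.pyGet? f0 (i + j) == some 0)

theorem winB_iff (f0 : List Int) (hr i : Int) :
    winB f0 hr i = true ↔ ∃ j ∈ PySem.List.pyRange (-hr) (hr + 1) 1,
      PySem.List.pyGet? f0 (i + j) = some 0 := by
  simp [winB, List.any_eq_true]

-- elementwise characterisation of A's whole double loop: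
-- the outer fold writes only position i at step i, and writes iff the window around i contains a zero
theorem A_char (f0 : List Int) (hr : Int) (idxs : List Int) :
    ∀ (st : List Int), (∀ i ∈ idxs, 0 ≤ i ∧ i < (st.length : Int)) → ∀ k : Nat,
    (idxs.foldl
      (fun f0_step2 i =>
        ((PySem.List.pyRange (-hr) (hr + 1) 1).foldl
          (fun (st2 : List Int × Bool) j =>
            if st2.2 = true then st2
            else if PySem.List.pyGet? f0 (i + j) = some 0 then
              (PySem.List.pySetD st2.1 i 0, true)
            else st2)
          (f0_step2, false)).1) st)[k]?
      = if (idxs.any (fun i => i == (k : Int) && winB f0 hr i)) = true then some 0 else st[k]? := by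
  induction idxs with
  | nil => intro st _ k; simp
  | cons i t ih =>
      intro st hb k
      have h0 : 0 ≤ i := (hb i List.mem_cons_self).1
      have hlt : i < (st.length : Int) := (hb i List.mem_cons_self).2
      rw [List.foldl_cons,
        break_fold (fun j => PySem.List.pyGet? f0 (i + j) = some 0)
          (fun l => PySem.List.pySetD l i 0) _ st,
        List.any_cons]
      by_cases hc : winB f0 hr i = true
      · rw [if_pos ((winB_iff f0 hr i).mp hc)]
        rw [ih (PySem.List.pySetD st i 0)
          (by intro i' hi'
              rw [PySem.List.length_pySetD]
              exact hb i' (List.mem_cons_of_mem _ hi')) k]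
        by_cases h2 : t.any (fun i' => i' == (k : Int) && winB f0 hr i') = true
        · rw [if_pos h2, if_pos (by simp [h2])]
        · rw [if_neg h2]
          by_cases hik : i = (k : Int)
          · rw [if_pos (by subst hik; simp [hc, h2]), PySem.List.pySetD_of_nonneg _ _ h0,
              List.getElem?_set, if_pos (by omega : i.toNat = k),
              if_pos (by omega : i.toNat < st.length)]
          · rw [if_neg (by simp [hik, h2] : ¬ ((i == (k : Int) && winB f0 hr i
                  || t.any fun i' => i' == (k : Int) && winB f0 hr i') = true)),
              PySem.List.pySetD_of_nonneg _ _ h0, List.getElem?_set,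
              if_neg (by omega : ¬ i.toNat = k)]
      · rw [if_neg (fun hp => hc ((winB_iff f0 hr i).mpr hp))]
        rw [ih st (fun i' hi' => hb i' (List.mem_cons_of_mem _ hi')) k]
        have hw : winB f0 hr i = false := by simpa using hc
        simp only [hw, Bool.and_false, Bool.false_or]

theorem foldl_const {α β : Type} (l : List β) (s : α) : l.foldl (fun a (_ : β) => a) s = s := by
  induction l generalizing s with
  | nil => rfl
  | cons x t ih => simpa using ih

-- ===== VERDICT (by name: the statement is the Claim_ definition above) =====
theorem FixStep2_spec : Claim_equal_FixStep2 := by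
  intro f0 vrm _
  unfold Spec_FixStep2 FixStep2 FixStep2_alt
  set hr := PySem.Int.floordiv (vrm - 1) 2 with hhr
  by_cases hneg : hr < 0
  · -- empty window: A never writes, B returns the input unchanged
    rw [if_pos hneg]
    have hwin : PySem.List.pyRange (-hr) (hr + 1) 1 = [] :=
      PySem.List.pyRange_one_eq_nil (by omega)
    simp only [hwin, List.foldl_nil]
    exact foldl_const _ f0
  · rw [if_neg hneg]
    have hzp : f0.foldl
        (fun (s : Int × List Int) v =>
          (s.1 + (if v = 0 then 1 else 0), s.2 ++ [s.1 + (if v = 0 then 1 else 0)]))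
        (0, [0])
      = (0 + ((f0.count 0 : Nat) : Int), [(0 : Int)] ++ scanZ f0 0) := scanZ_spec f0 0 [0]
    simp only [hzp]
    apply List.ext_getElem?
    intro k
    rw [A_char f0 hr (PySem.List.pyRange (hr + 1) ((f0.length : Int) - hr) 1) f0
        (by intro i hi
            have := PySem.List.mem_pyRange_one.mp hi
            constructor <;> omega) k]
    have hAcond : ((PySem.List.pyRange (hr + 1) ((f0.length : Int) - hr) 1).any
          (fun i => i == (k : Int) && winB f0 hr i) = true)
        ↔ (hr + 1 ≤ (k : Int) ∧ (k : Int) < (f0.length : Int) - hr ∧ winB f0 hr (k : Int) = true) := by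
      rw [List.any_eq_true]
      constructor
      · rintro ⟨i, hi, hcond⟩
        rw [Bool.and_eq_true, beq_iff_eq] at hcond
        obtain ⟨rfl, hw⟩ := hcond
        have hm := PySem.List.mem_pyRange_one.mp hi
        exact ⟨hm.1, hm.2, hw⟩
      · rintro ⟨h1, h2, h3⟩
        exact ⟨(k : Int), PySem.List.mem_pyRange_one.mpr ⟨h1, h2⟩, by simp [h3]⟩
    rw [List.getElem?_map, PySem.List.getElem?_enumerate]
    by_cases hk : k < f0.length
    · rw [List.getElem?_eq_getElem hk]
      simp only [Option.map_some, zero_add]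
      by_cases hb1 : hr + 1 ≤ (k : Int) ∧ (k : Int) < (f0.length : Int) - hr
      · -- inside the scanned band: window-has-zero ↔ prefix counts grow
        have hm1 : ((k : Int) - hr).toNat ≤ f0.length := by omega
        have hm2 : ((k : Int) + hr + 1).toNat ≤ f0.length := by omega
        have hpref : (PySem.List.pyGetD ([(0 : Int)] ++ scanZ f0 0) ((k : Int) - hr) 0
              < PySem.List.pyGetD ([(0 : Int)] ++ scanZ f0 0) ((k : Int) + hr + 1) 0)
            ↔ ((f0.take ((k : Int) - hr).toNat).count 0 < (f0.take ((k : Int) + hr + 1).toNat).count 0) := by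
          rw [PySem.List.pyGetD_of_nonneg _ _ (by omega), PySem.List.pyGetD_of_nonneg _ _ (by omega),
            List.getD_eq_getElem?_getD, List.getD_eq_getElem?_getD,
            prefix_getElem? f0 _ hm1, prefix_getElem? f0 _ hm2]
          simp only [Option.getD_some]
          constructor <;> intro h <;> exact_mod_cast h
        have hwz : (∃ j ∈ PySem.List.pyRange (-hr) (hr + 1) 1,
              PySem.List.pyGet? f0 ((k : Int) + j) = some 0)
            ↔ ((f0.take ((k : Int) - hr).toNat).count 0 < (f0.take ((k : Int) + hr + 1).toNat).count 0) := by
          rw [count_window f0 _ _ (by omega)]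
          constructor
          · rintro ⟨j, hj, hz⟩
            have hjr := PySem.List.mem_pyRange_one.mp hj
            rw [PySem.List.pyGet?_of_nonneg _ (by omega)] at hz
            exact ⟨((k : Int) + j).toNat, by omega, by omega, hz⟩
          · rintro ⟨m, h1, h2, hm⟩
            refine ⟨(m : Int) - (k : Int), PySem.List.mem_pyRange_one.mpr ⟨by omega, by omega⟩, ?_⟩
            rw [show (k : Int) + ((m : Int) - (k : Int)) = (m : Int) by ring,
              PySem.List.pyGet?_natCast]
            exact hm
        by_cases hc : winB f0 hr (k : Int) = true
        · rw [if_pos (hAcond.mpr ⟨hb1.1, hb1.2, hc⟩),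
            if_pos ⟨hb1.1, hb1.2, hpref.mpr (hwz.mp ((winB_iff f0 hr (k : Int)).mp hc))⟩]
        · rw [if_neg (fun hx => hc (hAcond.mp hx).2.2),
            if_neg (fun hx => hc ((winB_iff f0 hr (k : Int)).mpr (hwz.mpr (hpref.mp hx.2.2))))]
      · rw [if_neg (fun hx => hb1 ⟨(hAcond.mp hx).1, (hAcond.mp hx).2.1⟩),
          if_neg (fun hx => hb1 ⟨hx.1, hx.2.1⟩)]
    · rw [List.getElem?_eq_none (by omega),
        if_neg (fun hx => by have h := hAcond.mp hx; omega)]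
      rfl
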